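-- pv_equiv track=rewrite | github.com/smohapatra1/scripting | python/practice/start_again/2024/08292024/remove_consecutive_k_element_records.py | RemoveConsecutive
-- ===== SOURCE A (Python) =====
-- def RemoveConsecutive(test_list, K):
--     res = []
--     for i in test_list:
--         skip = False
--         for j in range(len(i) - 1):
--             if i[j] == K and i[j+1] == K :
--                 skip = True
--                 break
--         if not skip:
--             res.append(i)
--     return res
-- ===== SOURCE B (Python) =====
-- from itertools import groupby
--
-- def RemoveConsecutive(test_list, K):
--     return [i for i in test_list
--             if not any(v == K and sum(1 for _ in g) >= 2
--                        for v, g in groupby(i))]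
-- ===== Notes on version B (the rewrite author's own statement) =====
-- stated objective: idiomatic
-- what changed: Replaces the explicit index loop over adjacent pairs with an itertools.groupby run-length decomposition: a sublist is dropped iff some maximal run of equal values has value K and length >= 2.
import Mathlib
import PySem

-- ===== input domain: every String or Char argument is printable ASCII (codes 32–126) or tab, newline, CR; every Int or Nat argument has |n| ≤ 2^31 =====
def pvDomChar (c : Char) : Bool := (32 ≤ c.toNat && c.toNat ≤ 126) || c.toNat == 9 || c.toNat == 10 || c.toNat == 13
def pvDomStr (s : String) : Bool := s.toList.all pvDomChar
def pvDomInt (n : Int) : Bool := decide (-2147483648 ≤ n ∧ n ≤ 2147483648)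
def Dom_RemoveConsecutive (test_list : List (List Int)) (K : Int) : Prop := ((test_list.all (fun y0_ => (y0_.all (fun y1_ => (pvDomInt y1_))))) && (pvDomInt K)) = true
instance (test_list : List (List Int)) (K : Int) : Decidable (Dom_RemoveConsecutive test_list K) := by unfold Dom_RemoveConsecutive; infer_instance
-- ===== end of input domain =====

-- B replaces A's explicit adjacent-pair index loop by an itertools.groupby run-length
-- decomposition (drop a sublist iff some run has value K and length ≥ 2); objective: idiomatic.

-- ===== PORT A =====
-- inner 'for j in range(len(i)-1): … break' = early-exit scan over the index range
def pvASkip (i : List Int) (K : Int) : Bool :=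
  (PySem.List.pyRange 0 ((i.length : Int) - 1) 1).any
    (fun j => (PySem.List.pyGetD i j 0 == K) && (PySem.List.pyGetD i (j + 1) 0 == K))

def RemoveConsecutive (test_list : List (List Int)) (K : Int) : List (List Int) :=
  test_list.foldl (fun res i => if !pvASkip i K then res ++ [i] else res) []

-- ===== PORT B =====
-- itertools.groupby collapsed to (value, run-length) pairs, built left to right
def pvRunsAux (v : Int) (n : Nat) : List Int → List (Int × Nat)
  | [] => [(v, n)]
  | x :: xs => if x = v then pvRunsAux v (n + 1) xs else (v, n) :: pvRunsAux x 1 xs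

def pvRuns : List Int → List (Int × Nat)
  | [] => []
  | x :: xs => pvRunsAux x 1 xs

def pvBDrop (i : List Int) (K : Int) : Bool :=
  (pvRuns i).any (fun r => r.1 == K && decide (2 ≤ r.2))

def RemoveConsecutive_alt (test_list : List (List Int)) (K : Int) : List (List Int) :=
  test_list.filter (fun i => !pvBDrop i K)

-- ===== PRECONDITION & SPEC =====
def Spec_RemoveConsecutive (test_list : List (List Int)) (K : Int) (out : List (List Int)) : Prop := out = RemoveConsecutive_alt test_list K
instance (test_list : List (List Int)) (K : Int) (out : List (List Int)) : Decidable (Spec_RemoveConsecutive test_list K out) := by unfold Spec_RemoveConsecutive; infer_instance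

-- ===== CLAIM (what is proved, stated in full; the proofs are below) =====
def Claim_equal_RemoveConsecutive : Prop := ∀ (test_list : List (List Int)) (K : Int), Dom_RemoveConsecutive test_list K → Spec_RemoveConsecutive test_list K (RemoveConsecutive test_list K)

-- ===== LEMMAS AND PROOFS =====

-- common characterisation: "the list contains two consecutive K's"
def pvHasPair (K : Int) : List Int → Bool
  | [] => false
  | [_] => false
  | x :: y :: xs => (x == K && y == K) || pvHasPair K (y :: xs)

-- A's index scan rewritten over Nat indices
def pvIdxSkip (K : Int) (l : List Int) : Bool :=
  (List.range (l.length - 1)).any (fun k => (l.getD k 0 == K) && (l.getD (k + 1) 0 == K))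

theorem pvASkip_eq_idx (K : Int) (l : List Int) : pvASkip l K = pvIdxSkip K l := by
  unfold pvASkip pvIdxSkip
  rw [PySem.List.pyRange_one, List.any_map]
  have h : ((l.length : Int) - 1 - 0).toNat = l.length - 1 := by omega
  rw [h]
  apply congrArg
  funext k
  simp only [Function.comp, zero_add]
  rw [show (k : Int) + 1 = ((k + 1 : Nat) : Int) by push_cast; ring]
  simp only [PySem.List.pyGetD_natCast]

theorem pvIdx_eq_hasPair (K : Int) : ∀ l, pvIdxSkip K l = pvHasPair K l
  | [] => by simp [pvIdxSkip, pvHasPair]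
  | [x] => by simp [pvIdxSkip, pvHasPair]
  | x :: y :: xs => by
      have ih := pvIdx_eq_hasPair K (y :: xs)
      simp only [pvIdxSkip, List.length_cons, Nat.add_sub_cancel] at ih ⊢
      rw [List.range_succ_eq_map, List.any_cons, List.any_map]
      simp only [List.getD_cons_succ] at ih
      simp only [Function.comp_def, Nat.succ_eq_add_one, List.getD_cons_zero,
        List.getD_cons_succ]
      rw [ih]
      rfl

theorem pvRunsAux_any (K : Int) : ∀ (xs : List Int) (v : Int) (n : Nat), 1 ≤ n →
    ((pvRunsAux v n xs).any (fun r => r.1 == K && decide (2 ≤ r.2)) =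
      ((v == K && decide (2 ≤ n)) || pvHasPair K (v :: xs)))
  | [], v, n, _ => by simp [pvRunsAux, pvHasPair]
  | x :: xs, v, n, hn => by
      by_cases hx : x = v
      · subst hx
        have ih := pvRunsAux_any K xs x (n + 1) (by omega)
        have h2 : decide (2 ≤ n + 1) = true := by simp; omega
        rw [h2, Bool.and_true] at ih
        simp only [pvRunsAux, pvHasPair]
        rw [if_pos trivial, ih]
        by_cases hv : x = K <;> simp [hv]
      · have ih := pvRunsAux_any K xs x 1 le_rfl
        rw [show decide (2 ≤ (1 : Nat)) = false from rfl] at ih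
        simp only [Bool.and_false, Bool.false_or] at ih
        simp only [pvRunsAux, if_neg hx, List.any_cons, ih, pvHasPair]
        have hf : (v == K && x == K) = false := by
          by_cases hv : v = K
          · by_cases hxk : x = K
            · exact absurd (hxk.trans hv.symm) hx
            · simp [hxk]
          · simp [hv]
        rw [hf, Bool.false_or]

theorem pvBDrop_eq_hasPair (K : Int) : ∀ l, pvBDrop l K = pvHasPair K l
  | [] => by simp [pvBDrop, pvRuns, pvHasPair]
  | x :: xs => by
      have h := pvRunsAux_any K xs x 1 le_rfl
      simp only [pvBDrop, pvRuns, h]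
      simp

theorem pvASkip_eq_pvBDrop (K : Int) (l : List Int) : pvASkip l K = pvBDrop l K := by
  rw [pvASkip_eq_idx, pvIdx_eq_hasPair, pvBDrop_eq_hasPair]

-- ===== VERDICT (by name: the statement is the Claim_ definition above) =====
theorem RemoveConsecutive_spec : Claim_equal_RemoveConsecutive := by
  intro test_list K _
  unfold Spec_RemoveConsecutive RemoveConsecutive RemoveConsecutive_alt
  rw [PySem.List.foldl_append_if_eq_filter]
  simp only [pvASkip_eq_pvBDrop, List.nil_append]
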